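-- pv_equiv track=rewrite | github.com/jolsten/varuintarray | test_readme.py | parse_doctest_block
-- ===== SOURCE A (Python) =====
-- def parse_doctest_block(code):
--     """Parse a doctest-style code block.
--
--     Args:
--         code: Code block text.
--
--     Returns:
--         List of (input_lines, expected_output) tuples, or None if not a doctest block.
--     """
--     lines = code.split("\n")
--
--     # Check if this block contains any >>> prompts
--     if not any(line.strip().startswith(">>>") for line in lines):
--         return None
--
--     examples = []
--     current_input = []
--     current_output = []
--     in_example = False
--
--     for line in lines:
--         stripped = line.strip()
--
--         # Skip blank lines and comments
--         if not stripped or stripped.startswith("#"):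
--             continue
--
--         # Start of a new example
--         if stripped.startswith(">>>"):
--             # Save previous example if exists
--             if current_input:
--                 examples.append((current_input, current_output))
--                 current_input = []
--                 current_output = []
--
--             # Add this line to current input
--             current_input.append(stripped[4:])  # Remove '>>> '
--             in_example = True
--
--         # Continuation line
--         elif stripped.startswith("..."):
--             if in_example:
--                 current_input.append(stripped[4:])  # Remove '... '
--
--         # Expected output line
--         else:
--             if in_example:
--                 current_output.append(stripped)
--
--     # Don't forget the last example
--     if current_input:
--         examples.append((current_input, current_output))
--
--     return examples if examples else None
-- ===== SOURCE B (Python) =====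
-- def _examples(lines):
--     head, rest = lines[0], lines[1:]
--     body = []
--     while rest and not rest[0].startswith(">>>"):
--         body.append(rest[0])
--         rest = rest[1:]
--     inp = [head[4:]] + [s[4:] for s in body if s.startswith("...")]
--     out = [s for s in body if not s.startswith("...")]
--     return [(inp, out)] + (_examples(rest) if rest else [])
--
--
-- def parse_doctest_block(code):
--     """Parse a doctest-style code block (recursive decomposition: filter lines,
--     drop to the first prompt, then split off one example at a time)."""
--     lines = [s for s in map(str.strip, code.split("\n")) if s and not s.startswith("#")]
--     while lines and not lines[0].startswith(">>>"):
--         lines = lines[1:]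
--     if not lines:
--         return None
--     return _examples(lines)
-- ===== Notes on version B (the rewrite author's own statement) =====
-- stated objective: alternative
-- what changed: Replaces A's single stateful accumulator loop (examples/current_input/current_output/in_example flag) by a recursive decomposition: filter the stripped lines once, drop everything before the first prompt line, then recursively split off one example (prompt line + continuation/output body) at a time.
import Mathlib
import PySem

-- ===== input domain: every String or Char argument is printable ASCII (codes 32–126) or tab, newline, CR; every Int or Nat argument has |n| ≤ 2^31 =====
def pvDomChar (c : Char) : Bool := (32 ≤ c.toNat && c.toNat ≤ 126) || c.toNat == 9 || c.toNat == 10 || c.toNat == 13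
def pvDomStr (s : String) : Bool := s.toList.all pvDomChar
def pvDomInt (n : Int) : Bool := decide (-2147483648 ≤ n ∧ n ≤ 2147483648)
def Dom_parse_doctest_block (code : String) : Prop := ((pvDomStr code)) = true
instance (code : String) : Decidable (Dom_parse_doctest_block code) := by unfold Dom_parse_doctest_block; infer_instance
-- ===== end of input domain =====

-- B replaces A's single stateful accumulator loop by a recursive decomposition: filter the
-- stripped lines, drop to the first prompt line, then split off one example at a time
-- (alternative structure, same result; no speed claim).

-- ===== PORT A =====
-- the body of A's for-loop on the already-stripped line; state = (examples, current_input, current_output, in_example)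
def pvACore (st : List (List String × List String) × List String × List String × Bool)
    (stripped : String) : List (List String × List String) × List String × List String × Bool :=
  let (examples, cin, cout, inex) := st
  if stripped == "" || PySem.Str.startswith stripped "#" then st
  else if PySem.Str.startswith stripped ">>>" then
    let (examples, cin, cout) :=
      if cin ≠ [] then (examples ++ [(cin, cout)], ([] : List String), ([] : List String))
      else (examples, cin, cout)
    (examples, cin ++ [PySem.Str.slice stripped (some 4) none], cout, true)
  else if PySem.Str.startswith stripped "..." then
    (if inex then (examples, cin ++ [PySem.Str.slice stripped (some 4) none], cout, inex) else st)
  else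
    (if inex then (examples, cin, cout ++ [stripped], inex) else st)

-- one step of A's for-loop: 'stripped = line.strip()' then the branch cascade
def pvAStep (st : List (List String × List String) × List String × List String × Bool)
    (line : String) : List (List String × List String) × List String × List String × Bool :=
  pvACore st (PySem.Str.strip line)

def parse_doctest_block (code : String) : Option (List (List String × List String)) :=
  let lines := (PySem.Str.split? code "\n").getD []
  if !(lines.any (fun line => PySem.Str.startswith (PySem.Str.strip line) ">>>")) then none
  else
    let st := lines.foldl pvAStep ([], [], [], false)
    let (examples, cin, cout, _) := st
    let examples := if cin ≠ [] then examples ++ [(cin, cout)] else examples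
    if examples ≠ [] then some examples else none

-- ===== PORT B =====
-- stripped lines with blanks and '#' comments removed
def pdbFilter (code : String) : List String :=
  (((PySem.Str.split? code "\n").getD []).map PySem.Str.strip).filter
    (fun s => !(s == "") && !(PySem.Str.startswith s "#"))

-- B's inner while loop: split off the body lines before the next '>>>' prompt
def pdbSplitBody : List String → List String × List String
  | [] => ([], [])
  | s :: rest =>
    if PySem.Str.startswith s ">>>" then ([], s :: rest)
    else
      let p := pdbSplitBody rest
      (s :: p.1, p.2)

theorem pdbSplitBody_snd_length_le (l : List String) : (pdbSplitBody l).2.length ≤ l.length := by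
  induction l with
  | nil => simp [pdbSplitBody]
  | cons s rest ih =>
    simp only [pdbSplitBody]
    split
    · simp
    · simpa using Nat.le_succ_of_le ih

-- B's _examples (recursive)
def pdbExamples : List String → List (List String × List String)
  | [] => []
  | head :: rest =>
    let body := (pdbSplitBody rest).1
    let rest' := (pdbSplitBody rest).2
    let inp := PySem.Str.slice head (some 4) none ::
      ((body.filter (fun s => PySem.Str.startswith s "...")).map
        (fun s => PySem.Str.slice s (some 4) none))
    let out := body.filter (fun s => !(PySem.Str.startswith s "..."))
    (inp, out) :: (if rest' ≠ [] then pdbExamples rest' else [])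
  termination_by l => l.length
  decreasing_by
    have := pdbSplitBody_snd_length_le rest
    simp; omega

def parse_doctest_block_alt (code : String) : Option (List (List String × List String)) :=
  let lines := (pdbFilter code).dropWhile (fun s => !(PySem.Str.startswith s ">>>"))
  if lines = [] then none else some (pdbExamples lines)

-- ===== PRECONDITION & SPEC =====
def Spec_parse_doctest_block (code : String) (out : Option (List (List String × List String))) : Prop := out = parse_doctest_block_alt code
instance (code : String) (out : Option (List (List String × List String))) : Decidable (Spec_parse_doctest_block code out) := by unfold Spec_parse_doctest_block; infer_instance

-- ===== CLAIM (what is proved, stated in full; the proofs are below) =====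
def Claim_equal_parse_doctest_block : Prop := ∀ (code : String), Dom_parse_doctest_block code → Spec_parse_doctest_block code (parse_doctest_block code)

-- ===== LEMMAS AND PROOFS =====

-- a line starting with ">>>" is neither blank nor a comment
theorem prompt_keep {s : String} (h : PySem.Str.startswith s ">>>" = true) :
    (!(s == "") && !(PySem.Str.startswith s "#")) = true := by
  have h0 : PySem.Chars.startswith s.toList ['>', '>', '>'] = true := by simpa using h
  obtain ⟨t, ht⟩ := (PySem.Chars.startswith_iff _ _).mp h0
  have hne : (s == "") = false := by
    apply beq_eq_false_iff_ne.mpr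
    intro he; subst he; simp at ht
  have h2 : PySem.Chars.startswith s.toList ['#'] = false := by
    cases hb : PySem.Chars.startswith s.toList ['#'] with
    | false => rfl
    | true =>
      obtain ⟨u, hu⟩ := (PySem.Chars.startswith_iff _ _).mp hb
      rw [← ht] at hu
      simp at hu
  simp [hne, h2]

-- A's fold over the raw lines equals the fold of the core step over the filtered stripped lines
theorem fold_filter (lines : List String)
    (st : List (List String × List String) × List String × List String × Bool) :
    lines.foldl pvAStep st =
      ((lines.map PySem.Str.strip).filter
        (fun s => !(s == "") && !(PySem.Str.startswith s "#"))).foldl pvACore st := by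
  induction lines generalizing st with
  | nil => rfl
  | cons l t ih =>
    simp only [List.map_cons, List.filter_cons]
    cases hk : (!(PySem.Str.strip l == "") && !(PySem.Str.startswith (PySem.Str.strip l) "#")) with
    | false =>
      have hcond : (PySem.Str.strip l == "" || PySem.Str.startswith (PySem.Str.strip l) "#") = true := by
        simp only [Bool.and_eq_false_iff, Bool.not_eq_false'] at hk
        simp only [Bool.or_eq_true]
        rcases hk with hk | hk
        · exact Or.inl hk
        · exact Or.inr hk
      have hstep : pvAStep st l = st := by
        rcases st with ⟨ex, cin, cout, inex⟩
        simp only [pvAStep, pvACore]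
        rw [if_pos hcond]
      simp only [List.foldl_cons, hstep, ih]
      simp
    | true =>
      simp only [List.foldl_cons, ih]
      rfl

-- the guard 'any line starts with >>>' transfers to the filtered list
theorem guard_filter (lines : List String) :
    (lines.any (fun line => PySem.Str.startswith (PySem.Str.strip line) ">>>")) =
      (((lines.map PySem.Str.strip).filter
        (fun s => !(s == "") && !(PySem.Str.startswith s "#"))).any
          (fun s => PySem.Str.startswith s ">>>")) := by
  rw [Bool.eq_iff_iff]
  simp only [List.any_eq_true, List.mem_filter, List.mem_map]
  constructor
  · rintro ⟨l, hl, hp⟩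
    exact ⟨PySem.Str.strip l, ⟨⟨l, hl, rfl⟩, prompt_keep hp⟩, hp⟩
  · rintro ⟨s, ⟨⟨l, hl, rfl⟩, _⟩, hp⟩
    exact ⟨l, hl, hp⟩

-- A's runner after the first prompt, in closed form
def pvARun (cin cout : List String) : List String → List (List String × List String)
  | [] => [(cin, cout)]
  | s :: t =>
    if PySem.Str.startswith s ">>>" then
      (cin, cout) :: pvARun [PySem.Str.slice s (some 4) none] [] t
    else if PySem.Str.startswith s "..." then
      pvARun (cin ++ [PySem.Str.slice s (some 4) none]) cout t
    else pvARun cin (cout ++ [s]) t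

theorem pvARun_ne_nil (l : List String) : ∀ cin cout, pvARun cin cout l ≠ [] := by
  induction l with
  | nil => intro cin cout; simp [pvARun]
  | cons s t ih =>
    intro cin cout
    simp only [pvARun]
    split
    · simp
    · split
      · exact ih _ _
      · exact ih _ _

def pvFinish (st : List (List String × List String) × List String × List String × Bool) :
    List (List String × List String) :=
  if st.2.1 ≠ [] then st.1 ++ [(st.2.1, st.2.2.1)] else st.1

theorem fold_arun (l : List String) :
    ∀ (ex : List (List String × List String)) (cin cout : List String), cin ≠ [] →
    (∀ s ∈ l, (!(s == "") && !(PySem.Str.startswith s "#")) = true) →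
    pvFinish (l.foldl pvACore (ex, cin, cout, true)) = ex ++ pvARun cin cout l := by
  induction l with
  | nil =>
    intro ex cin cout hcin _
    simp [pvFinish, pvARun, hcin]
  | cons s t ih =>
    intro ex cin cout hcin hk
    have hks := hk s (List.mem_cons_self ..)
    simp only [Bool.and_eq_true, Bool.not_eq_true'] at hks
    obtain ⟨h1, h2⟩ := hks
    have h2' : PySem.Chars.startswith s.toList ['#'] = false := by simpa using h2
    have hskip : ¬ ((s == "" || PySem.Str.startswith s "#") = true) := by simp [h1, h2']
    have htail : ∀ x ∈ t, (!(x == "") && !(PySem.Str.startswith x "#")) = true :=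
      fun x hx => hk x (List.mem_cons_of_mem _ hx)
    by_cases hp : PySem.Str.startswith s ">>>" = true
    · have hstep : pvACore (ex, cin, cout, true) s =
          (ex ++ [(cin, cout)], [PySem.Str.slice s (some 4) none], [], true) := by
        simp only [pvACore]
        rw [if_neg hskip, if_pos hp, if_pos hcin]
        rfl
      rw [List.foldl_cons, hstep, ih _ _ _ (by simp) htail]
      simp only [pvARun]
      rw [if_pos hp]
      simp
    · by_cases hd : PySem.Str.startswith s "..." = true
      · have hstep : pvACore (ex, cin, cout, true) s =
            (ex, cin ++ [PySem.Str.slice s (some 4) none], cout, true) := by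
          simp only [pvACore]
          rw [if_neg hskip, if_neg hp, if_pos hd]
          simp
        rw [List.foldl_cons, hstep, ih _ _ _ (by simp) htail]
        simp only [pvARun]
        rw [if_neg hp, if_pos hd]
      · have hstep : pvACore (ex, cin, cout, true) s = (ex, cin, cout ++ [s], true) := by
          simp only [pvACore]
          rw [if_neg hskip, if_neg hp, if_neg hd]
          simp
        rw [List.foldl_cons, hstep, ih _ _ _ hcin htail]
        simp only [pvARun]
        rw [if_neg hp, if_neg hd]

theorem arun_examples (t : List String) :
    ∀ (cin cout : List String),
    pvARun cin cout t =
      (cin ++ ((pdbSplitBody t).1.filter (fun s => PySem.Str.startswith s "...")).map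
          (fun s => PySem.Str.slice s (some 4) none),
       cout ++ (pdbSplitBody t).1.filter (fun s => !(PySem.Str.startswith s "..."))) ::
        (if (pdbSplitBody t).2 ≠ [] then pdbExamples (pdbSplitBody t).2 else []) := by
  induction t with
  | nil => intro cin cout; simp [pvARun, pdbSplitBody]
  | cons s t ih =>
    intro cin cout
    simp only [pvARun, pdbSplitBody]
    split
    · rename_i hp
      rw [ih]
      simp [pdbExamples]
    · rename_i hp
      rw [Bool.not_eq_true] at hp
      split
      · rename_i hd
        have hd' : PySem.Chars.startswith s.toList ['.', '.', '.'] = true := by simpa using hd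
        rw [ih]
        simp [hd']
      · rename_i hd
        rw [Bool.not_eq_true] at hd
        have hd' : PySem.Chars.startswith s.toList ['.', '.', '.'] = false := by simpa using hd
        rw [ih]
        simp [hd']

-- the fold does nothing on the pre-prompt filtered prefix
theorem fold_prefix (P : List String) (hP : ∀ s ∈ P, PySem.Str.startswith s ">>>" = false) :
    P.foldl pvACore (([] : List (List String × List String)), ([] : List String), ([] : List String), false) =
      ([], [], [], false) := by
  induction P with
  | nil => rfl
  | cons s t ih =>
    have hs := hP s (List.mem_cons_self ..)
    have hstep : pvACore ([], [], [], false) s = ([], [], [], false) := by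
      simp only [pvACore]
      by_cases hsk : (s == "" || PySem.Str.startswith s "#") = true
      · rw [if_pos hsk]
      · rw [if_neg hsk, if_neg (by rw [hs]; simp : ¬ (PySem.Str.startswith s ">>>" = true))]
        split <;> simp
    simp only [List.foldl_cons, hstep]
    exact ih (fun x hx => hP x (List.mem_cons_of_mem _ hx))

-- ===== VERDICT (by name: the statement is the Claim_ definition above) =====
theorem parse_doctest_block_spec : Claim_equal_parse_doctest_block := by
  intro code _
  unfold Spec_parse_doctest_block parse_doctest_block parse_doctest_block_alt
  set lines := (PySem.Str.split? code "\n").getD [] with hlines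
  have hF : pdbFilter code =
      (lines.map PySem.Str.strip).filter (fun s => !(s == "") && !(PySem.Str.startswith s "#")) := by
    simp [pdbFilter, hlines]
  set F := pdbFilter code with hFdef
  cases hany : lines.any (fun line => PySem.Str.startswith (PySem.Str.strip line) ">>>") with
  | false =>
    have hnone : ∀ s ∈ F, PySem.Str.startswith s ">>>" = false := by
      rw [guard_filter, ← hF] at hany
      simpa [List.any_eq_false] using hany
    have hdw : F.dropWhile (fun s => !(PySem.Str.startswith s ">>>")) = [] := by
      rw [List.dropWhile_eq_nil_iff]
      intro x hx
      simpa using hnone x hx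
    simp only [hany, hdw]
    simp
  | true =>
    have hany' : F.any (fun s => PySem.Str.startswith s ">>>") = true := by
      rw [guard_filter, ← hF] at hany; exact hany
    -- the dropWhile part is nonempty and starts with a prompt
    have hdw_ne : F.dropWhile (fun s => !(PySem.Str.startswith s ">>>")) ≠ [] := by
      intro hnil
      rw [List.dropWhile_eq_nil_iff] at hnil
      simp only [List.any_eq_true] at hany'
      obtain ⟨x, hx, hp⟩ := hany'
      have h3 := hnil x hx
      rw [hp] at h3
      simp at h3
    obtain ⟨g, G', hGG⟩ := List.exists_cons_of_ne_nil hdw_ne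
    have hgp : PySem.Str.startswith g ">>>" = true := by
      have h4 := List.head_dropWhile_not (fun s => !(PySem.Str.startswith s ">>>")) hdw_ne
      have hhead : (F.dropWhile (fun s => !(PySem.Str.startswith s ">>>"))).head hdw_ne = g := by
        simp only [hGG, List.head_cons]
      rw [hhead] at h4
      simpa using h4
    have hsplit : F = F.takeWhile (fun s => !(PySem.Str.startswith s ">>>")) ++ (g :: G') := by
      rw [← hGG, List.takeWhile_append_dropWhile]
    have hkeepF : ∀ s ∈ F, (!(s == "") && !(PySem.Str.startswith s "#")) = true := by
      intro s hs
      rw [hF] at hs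
      exact (List.mem_filter.mp hs).2
    -- evaluate A's fold
    have hfold : lines.foldl pvAStep ([], [], [], false) =
        (g :: G').foldl pvACore ([], [], [], false) := by
      rw [fold_filter, ← hF, hsplit, List.foldl_append, fold_prefix]
      intro s hs
      have := List.mem_takeWhile_imp hs
      simpa using this
    have hg_keep := hkeepF g (by rw [hsplit]; exact List.mem_append_right _ (List.mem_cons_self ..))
    simp only [Bool.and_eq_true, Bool.not_eq_true'] at hg_keep
    obtain ⟨hg1, hg2⟩ := hg_keep
    have hg2' : PySem.Chars.startswith g.toList ['#'] = false := by simpa using hg2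
    have hstepg : pvACore ([], [], [], false) g =
        ([], [PySem.Str.slice g (some 4) none], [], true) := by
      simp only [pvACore]
      rw [if_neg (show ¬ ((g == "" || PySem.Str.startswith g "#") = true) by simp [hg1, hg2']),
        if_pos hgp]
      simp
    have hG'keep : ∀ s ∈ G', (!(s == "") && !(PySem.Str.startswith s "#")) = true := by
      intro s hs
      exact hkeepF s (by rw [hsplit]; exact List.mem_append_right _ (List.mem_cons_of_mem _ hs))
    have hrun : pvFinish (lines.foldl pvAStep ([], [], [], false)) =
        pvARun [PySem.Str.slice g (some 4) none] [] G' := by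
      rw [hfold, List.foldl_cons, hstepg,
        fold_arun G' [] _ [] (by simp) hG'keep]
      simp
    -- B's side: the recursive decomposition computes the same example list
    have hB : pdbExamples (g :: G') = pvARun [PySem.Str.slice g (some 4) none] [] G' := by
      rw [arun_examples]
      simp [pdbExamples]
    -- assemble
    rcases hst : lines.foldl pvAStep ([], [], [], false) with ⟨ex, cin, cout, inex⟩
    rw [hst] at hrun
    have hfin : (if cin ≠ [] then ex ++ [(cin, cout)] else ex) =
        pvARun [PySem.Str.slice g (some 4) none] [] G' := by
      simpa [pvFinish] using hrun
    have hne : (if cin ≠ [] then ex ++ [(cin, cout)] else ex) ≠ [] := by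
      rw [hfin]
      exact pvARun_ne_nil G' _ _
    simp only [hany, Bool.not_true, hGG, hst]
    rw [if_neg (by simp), if_pos hne, if_neg (by simp : ¬ (g :: G' = []))]
    rw [hfin, hB]
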